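-- pv_equiv track=rewrite | github.com/Egraf99/Running_line | symbols.py | from_bottom_to_up_with_up
-- ===== SOURCE A (Python) =====
-- def from_bottom_to_up_with_up(pix_column: list, height: int, symbol_id, order_col) -> list:
--     for h in range(height):
--         if 1 < order_col < height - 1:
--             if h == (height - order_col):
--                 pix_column.append(symbol_id[0])
--             elif h == 0:
--                 pix_column.append(symbol_id[1])
--             else:
--                 pix_column.append(0)
--         else:
--             if h == (height - order_col):
--                 pix_column.append(symbol_id[0])
--             else:
--                 pix_column.append(0)
--     return pix_column
-- ===== SOURCE B (Python) =====
-- def from_bottom_to_up_with_up(pix_column: list, height: int, symbol_id, order_col) -> list: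
--     col = [0] * height
--     marker = height - order_col
--     if marker in range(height):
--         col[marker] = symbol_id[0]
--     if 1 < order_col < height - 1:
--         col[0] = symbol_id[1]
--     pix_column.extend(col)
--     return pix_column
-- ===== Notes on version B (the rewrite author's own statement) =====
-- stated objective: simpler
-- what changed: Instead of looping over every row and branching per element, B allocates a zero column once, computes the marker position height - order_col and assigns the (at most two) symbol cells directly, then extends pix_column with the column.
import Mathlib
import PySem

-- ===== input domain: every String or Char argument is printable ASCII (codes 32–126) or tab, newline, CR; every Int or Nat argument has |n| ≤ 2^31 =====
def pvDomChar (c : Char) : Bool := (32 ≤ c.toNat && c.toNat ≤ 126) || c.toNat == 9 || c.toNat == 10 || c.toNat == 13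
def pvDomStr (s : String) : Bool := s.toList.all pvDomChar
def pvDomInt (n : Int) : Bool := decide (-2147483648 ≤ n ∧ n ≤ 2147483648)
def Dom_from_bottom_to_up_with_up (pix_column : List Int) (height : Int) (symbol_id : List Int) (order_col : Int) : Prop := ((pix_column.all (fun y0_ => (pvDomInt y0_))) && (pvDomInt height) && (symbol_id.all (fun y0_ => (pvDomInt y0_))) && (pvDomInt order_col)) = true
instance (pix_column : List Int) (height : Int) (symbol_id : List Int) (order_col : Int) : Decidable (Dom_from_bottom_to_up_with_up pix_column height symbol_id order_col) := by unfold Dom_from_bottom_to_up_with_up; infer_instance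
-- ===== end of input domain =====

-- B replaces the per-row branching loop by allocating a zero column and assigning the at most
-- two marker cells directly (objective: simpler). Both Pythons mutate pix_column in place
-- identically (A appends element-wise, B extends with the same elements); the equivalence
-- proved here is about the returned list.

-- ===== PORT A =====
def from_bottom_to_up_with_up (pix_column : List Int) (height : Int) (symbol_id : List Int) (order_col : Int) : List Int :=
  (PySem.List.pyRange 0 height 1).foldl (fun acc h =>
    if 1 < order_col ∧ order_col < height - 1 then
      if h = height - order_col then acc ++ [(PySem.List.pyGet? symbol_id 0).getD 0]
      else if h = 0 then acc ++ [(PySem.List.pyGet? symbol_id 1).getD 0]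
      else acc ++ [0]
    else
      if h = height - order_col then acc ++ [(PySem.List.pyGet? symbol_id 0).getD 0]
      else acc ++ [0]) pix_column

-- ===== PORT B =====
def from_bottom_to_up_with_up_alt (pix_column : List Int) (height : Int) (symbol_id : List Int) (order_col : Int) : List Int :=
  let col := List.replicate height.toNat (0 : Int)
  let marker := height - order_col
  let col := if 0 ≤ marker ∧ marker < height then
               col.set marker.toNat ((PySem.List.pyGet? symbol_id 0).getD 0)
             else col
  let col := if 1 < order_col ∧ order_col < height - 1 then
               col.set 0 ((PySem.List.pyGet? symbol_id 1).getD 0)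
             else col
  pix_column ++ col

-- ===== PRECONDITION & SPEC =====
-- Pre_ excludes exactly the inputs where A raises IndexError: symbol_id too short for the
-- subscript(s) the loop actually performs (B raises there as well).
def Pre_from_bottom_to_up_with_up (pix_column : List Int) (height : Int) (symbol_id : List Int) (order_col : Int) : Prop :=
  ((0 ≤ height - order_col ∧ height - order_col < height) → symbol_id ≠ []) ∧
  ((1 < order_col ∧ order_col < height - 1) → 2 ≤ symbol_id.length)
instance (pix_column : List Int) (height : Int) (symbol_id : List Int) (order_col : Int) : Decidable (Pre_from_bottom_to_up_with_up pix_column height symbol_id order_col) := by unfold Pre_from_bottom_to_up_with_up; infer_instance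

def pvWitness_from_bottom_to_up_with_up : List Int × Int × List Int × Int := ([], 5, [7, 8], 2)

def Spec_from_bottom_to_up_with_up (pix_column : List Int) (height : Int) (symbol_id : List Int) (order_col : Int) (out : List Int) : Prop := out = from_bottom_to_up_with_up_alt pix_column height symbol_id order_col
instance (pix_column : List Int) (height : Int) (symbol_id : List Int) (order_col : Int) (out : List Int) : Decidable (Spec_from_bottom_to_up_with_up pix_column height symbol_id order_col out) := by unfold Spec_from_bottom_to_up_with_up; infer_instance

-- ===== CLAIM (what is proved, stated in full; the proofs are below) =====
def Claim_equal_from_bottom_to_up_with_up : Prop := ∀ (pix_column : List Int) (height : Int) (symbol_id : List Int) (order_col : Int), Dom_from_bottom_to_up_with_up pix_column height symbol_id order_col → Pre_from_bottom_to_up_with_up pix_column height symbol_id order_col → Spec_from_bottom_to_up_with_up pix_column height symbol_id order_col (from_bottom_to_up_with_up pix_column height symbol_id order_col)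

-- ===== LEMMAS AND PROOFS =====

-- the value A appends at row h, as a function of h
def pvCell (height : Int) (symbol_id : List Int) (order_col : Int) (h : Int) : Int :=
  if 1 < order_col ∧ order_col < height - 1 then
    if h = height - order_col then (PySem.List.pyGet? symbol_id 0).getD 0
    else if h = 0 then (PySem.List.pyGet? symbol_id 1).getD 0
    else 0
  else
    if h = height - order_col then (PySem.List.pyGet? symbol_id 0).getD 0
    else 0

theorem from_bottom_eq_map (pix_column : List Int) (height : Int) (symbol_id : List Int) (order_col : Int) :
    from_bottom_to_up_with_up pix_column height symbol_id order_col
      = pix_column ++ (PySem.List.pyRange 0 height 1).map (pvCell height symbol_id order_col) := by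
  unfold from_bottom_to_up_with_up
  have hstep : (fun (acc : List Int) (h : Int) =>
      if 1 < order_col ∧ order_col < height - 1 then
        if h = height - order_col then acc ++ [(PySem.List.pyGet? symbol_id 0).getD 0]
        else if h = 0 then acc ++ [(PySem.List.pyGet? symbol_id 1).getD 0]
        else acc ++ [0]
      else
        if h = height - order_col then acc ++ [(PySem.List.pyGet? symbol_id 0).getD 0]
        else acc ++ [0])
      = fun acc h => acc ++ [pvCell height symbol_id order_col h] := by
    funext acc h
    unfold pvCell
    split_ifs <;> rfl
  rw [hstep, PySem.List.foldl_append_singleton_eq_map]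

theorem from_bottom_to_up_with_up_spec : Claim_equal_from_bottom_to_up_with_up := by
  intro pix_column height symbol_id order_col _ _
  unfold Spec_from_bottom_to_up_with_up
  rw [from_bottom_eq_map]
  unfold from_bottom_to_up_with_up_alt
  congr 1
  rw [PySem.List.pyRange_one]
  apply List.ext_getElem
  · split_ifs <;> simp
  · intro k hk1 hk2
    have hkn : k < height.toNat := by simpa using hk1
    have hkh : (k : Int) < height := by omega
    simp only [List.getElem_map, List.getElem_range, Int.sub_zero, zero_add]
    unfold pvCell
    by_cases hc : 1 < order_col ∧ order_col < height - 1
    · have hm1 : 0 ≤ height - order_col := by omega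
      have hm2 : height - order_col < height := by omega
      simp only [if_pos hc, if_pos (show 0 ≤ height - order_col ∧ height - order_col < height from ⟨hm1, hm2⟩)]
      simp only [List.getElem_set]
      by_cases h1 : (k : Int) = height - order_col
      · have e1 : (height - order_col).toNat = k := by omega
        have e2 : 0 ≠ k := by omega
        simp [h1, e1, e2]
      · by_cases h2 : k = 0
        · subst h2
          simp only [Nat.cast_zero] at h1
          simp [h1]
        · have e1 : (height - order_col).toNat ≠ k := by omega
          have e2 : 0 ≠ k := fun h => h2 h.symm
          simp [h1, e1, e2, h2]
    · simp only [if_neg hc]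
      by_cases hm : 0 ≤ height - order_col ∧ height - order_col < height
      · simp only [if_pos hm, List.getElem_set]
        by_cases h1 : (k : Int) = height - order_col
        · have e1 : (height - order_col).toNat = k := by omega
          simp [h1, e1]
        · have e1 : (height - order_col).toNat ≠ k := by omega
          simp [h1, e1]
      · have h1 : (k : Int) ≠ height - order_col := by omega
        simp only [if_neg hm]
        simp [h1]
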